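-- pv_equiv track=rewrite | github.com/mathchou/GameOfCycles-3p | main.py | find_longest_circular_runs
-- ===== SOURCE A (Python) =====
-- def find_longest_circular_runs(vec):
--     n = len(vec)
--     doubled = vec + vec
--     max_run = 0
--     current_run = 0
--     temp_start = 0
--     start_indices = []
--
--     for i, v in enumerate(doubled):
--         if v == 1:
--             if current_run == 0:
--                 temp_start = i
--             current_run += 1
--             if i < n:
--                 if current_run > max_run:
--                     max_run = current_run
--                     start_indices = [temp_start % n]
--                 elif current_run == max_run:
--                     start_indices.append(temp_start % n)
--         else:
--             current_run = 0
--
--     return max_run, list(set(start_indices))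
-- ===== SOURCE B (Python) =====
-- def find_longest_circular_runs(vec):
--     n = len(vec)
--     # Segment vec into maximal blocks of consecutive 1s: (start, length).
--     blocks = []
--     i = 0
--     while i < n:
--         if vec[i] == 1:
--             j = i
--             while j < n and vec[j] == 1:
--                 j += 1
--             blocks.append((i, j - i))
--             i = j
--         else:
--             i += 1
--     max_run = max((length for _, length in blocks), default=0)
--     starts = [s for s, length in blocks if length == max_run]
--     return max_run, list(set(starts))
-- ===== Notes on version B (the rewrite author's own statement) =====
-- stated objective: alternative
-- what changed: Instead of A's stateful running-max scan over the doubled array (whose second half is dead code), B segments vec once into maximal blocks of consecutive 1s as (start, length) pairs and then takes the maximum length and filters the blocks of that length.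
import Mathlib
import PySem

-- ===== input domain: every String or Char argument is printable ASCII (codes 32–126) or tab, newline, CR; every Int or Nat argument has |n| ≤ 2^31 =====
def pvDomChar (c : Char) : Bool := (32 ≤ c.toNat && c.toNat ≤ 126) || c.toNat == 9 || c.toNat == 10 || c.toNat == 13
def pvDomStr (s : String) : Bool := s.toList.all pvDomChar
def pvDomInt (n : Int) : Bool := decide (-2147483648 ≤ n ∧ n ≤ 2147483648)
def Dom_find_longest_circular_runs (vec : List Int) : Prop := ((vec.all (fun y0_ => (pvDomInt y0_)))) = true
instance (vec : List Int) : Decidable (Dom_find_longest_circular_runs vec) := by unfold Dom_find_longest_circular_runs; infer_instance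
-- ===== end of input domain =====

-- B replaces A's stateful running-max scan over the doubled array (A's second half never updates
-- the result) by one segmentation of vec into maximal 1-blocks followed by max/filter over the
-- blocks; the return values are proved equal (neither program mutates its argument).
-- Both ports render Python's final `list(set(starts))` with pyIntSetList, an exact model of
-- CPython's int-set iteration order (the start indices are always nonnegative).

-- ===== shared helper: CPython's list(set(xs)) =====
-- Exact model of CPython's set insertion/iteration order (open addressing, LINEAR_PROBES = 9,
-- PERTURB_SHIFT = 5, growth x4 when fill*5 >= mask*3) for lists of NONNEGATIVE ints (hash n = n);
-- both programs apply it only to lists of nonnegative start indices.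
def pvScan (tbl : Array (Option Nat)) (h : Nat) : Nat → Nat → Option Nat
  | probes, i =>
    let e := tbl.getD i none
    if e = none ∨ e = some h then some i
    else match probes with
      | 0 => none
      | p + 1 => pvScan tbl h p (i + 1)

def pvFindGo (tbl : Array (Option Nat)) (h : Nat) : Nat → Nat → Nat → Nat
  | 0, i, _ => i
  | fuel + 1, i, perturb =>
    let mask := tbl.size - 1
    let probes := if i + 9 ≤ mask then 9 else 0
    match pvScan tbl h probes i with
    | some j => j
    | none =>
      let p := perturb >>> 5
      pvFindGo tbl h fuel ((i * 5 + 1 + p) % (mask + 1)) p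

def pvFindSlot (tbl : Array (Option Nat)) (h : Nat) : Nat :=
  pvFindGo tbl h (tbl.size * 64 + 64) (h % tbl.size) h

def pvNewSizeGo (minused : Nat) : Nat → Nat → Nat
  | 0, s => s
  | f + 1, s => if s ≤ minused then pvNewSizeGo minused f (2 * s) else s

def pvSetAdd (st : Array (Option Nat) × Nat) (h : Nat) : Array (Option Nat) × Nat :=
  let tbl := st.1
  let fill := st.2
  let j := pvFindSlot tbl h
  if tbl.getD j none = some h then (tbl, fill)
  else
    let tbl := tbl.set! j (some h)
    let fill := fill + 1
    if (tbl.size - 1) * 3 ≤ fill * 5 then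
      let elems := tbl.toList.filterMap id
      let ns := pvNewSizeGo (if 50000 < fill then fill * 2 else fill * 4) 64 8
      (elems.foldl (fun t v => t.set! (pvFindSlot t v) (some v))
        (Array.replicate ns none), fill)
    else (tbl, fill)

def pyIntSetList (xs : List Int) : List Int :=
  let st := xs.foldl (fun st v => pvSetAdd st v.toNat) (Array.replicate 8 (none : Option Nat), 0)
  st.1.toList.filterMap (fun o => o.map (fun n => (n : Int)))

-- ===== PORT A =====
-- one loop step of A's `for i, v in enumerate(doubled)` over the state (max_run, current_run, temp_start, start_indices)
def pvStepA (n : Int) (st : Int × Int × Int × List Int) (iv : Int × Int) : Int × Int × Int × List Int :=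
  let m := st.1; let c := st.2.1; let t := st.2.2.1; let si := st.2.2.2
  let i := iv.1; let v := iv.2
  if v = 1 then
    let t' := if c = 0 then i else t
    let c' := c + 1
    if i < n then
      if c' > m then (c', c', t', [PySem.Int.mod t' n])
      else if c' = m then (m, c', t', si ++ [PySem.Int.mod t' n])
      else (m, c', t', si)
    else (m, c', t', si)
  else (m, 0, t, si)

def find_longest_circular_runs (vec : List Int) : Int × List Int :=
  let n : Int := vec.length
  let doubled := vec ++ vec
  let fin := (PySem.List.enumerate doubled 0).foldl (pvStepA n) (0, 0, 0, [])
  (fin.1, pyIntSetList fin.2.2.2)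

-- ===== PORT B =====
-- inner `while j < n and vec[j] == 1` of Source B: length of the leading 1-run, and the rest of the list
def pvSplitRun : List Int → Nat × List Int
  | [] => (0, [])
  | x :: xs => if x = 1 then ((pvSplitRun xs).1 + 1, (pvSplitRun xs).2) else (0, x :: xs)

-- (cited by pvBlocks' termination proof)
theorem pvSplitRun_len_le (l : List Int) : (pvSplitRun l).2.length ≤ l.length := by
  induction l with
  | nil => simp [pvSplitRun]
  | cons x xs ih => by_cases h : x = 1 <;> simp [pvSplitRun, h] <;> omega

-- outer `while i < n` loop of B: the list of maximal 1-blocks as (start, length) pairs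
def pvBlocks : List Int → Int → List (Int × Int)
  | [], _ => []
  | x :: xs, i =>
    if x = 1 then
      ((i, ((pvSplitRun (x :: xs)).1 : Int)) ::
        pvBlocks (pvSplitRun (x :: xs)).2 (i + ((pvSplitRun (x :: xs)).1 : Int)))
    else pvBlocks xs (i + 1)
  termination_by l _ => l.length
  decreasing_by
    · simp only [pvSplitRun, if_pos ‹x = 1›]
      have := pvSplitRun_len_le xs; simp; omega
    · simp

def find_longest_circular_runs_alt (vec : List Int) : Int × List Int :=
  let bl := pvBlocks vec 0
  let maxRun := PySem.List.maxD (bl.map (·.2)) (fun x => x) 0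
  let starts := (bl.filter (fun p => p.2 == maxRun)).map (·.1)
  (maxRun, pyIntSetList starts)

-- ===== PRECONDITION & SPEC =====
def Spec_find_longest_circular_runs (vec : List Int) (out : Int × List Int) : Prop := out = find_longest_circular_runs_alt vec
instance (vec : List Int) (out : Int × List Int) : Decidable (Spec_find_longest_circular_runs vec out) := by unfold Spec_find_longest_circular_runs; infer_instance

-- ===== CLAIM (what is proved, stated in full; the proofs are below) =====
def Claim_equal_find_longest_circular_runs : Prop := ∀ (vec : List Int), Dom_find_longest_circular_runs vec → Spec_find_longest_circular_runs vec (find_longest_circular_runs vec)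

-- ===== LEMMAS AND PROOFS =====

-- reference fold over the block list: one step is the net effect of A's loop over one maximal 1-block
def pvG (bl : List (Int × Int)) (a : Int × List Int) : Int × List Int :=
  bl.foldl (fun a p =>
    if p.2 > a.1 then (p.2, [p.1])
    else if p.2 = a.1 then (a.1, a.2 ++ [p.1])
    else a) a

-- the fold computes the maximal length and the starts of the blocks attaining it
theorem pvG_spec (bl : List (Int × Int)) (m : Int) (st : List Int) :
    pvG bl (m, st) =
      ((bl.map (·.2)).foldl max m,
        (if (bl.map (·.2)).foldl max m = m then st else []) ++
          (bl.filter (fun p => p.2 == (bl.map (·.2)).foldl max m)).map (·.1)) := by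
  induction bl generalizing m st with
  | nil => simp [pvG]
  | cons p rest ih =>
      obtain ⟨i, k⟩ := p
      simp only [pvG] at ih
      simp only [pvG, List.foldl_cons, List.map_cons, List.filter_cons]
      have hM : ∀ a : Int, a ≤ (rest.map (·.2)).foldl max a :=
        fun a => (PySem.List.le_foldl_max (rest.map (·.2)) a).1
      by_cases h1 : k > m
      · have hmax : max m k = k := by omega
        rw [if_pos h1, ih k [i]]
        simp only [hmax]
        have hMk := hM k
        have hne : ¬ ((rest.map (·.2)).foldl max k = m) := by omega
        by_cases h2 : (rest.map (·.2)).foldl max k = k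
        · simp [h2, hne]
          try (intro h; exact absurd h (by omega))
        · simp [h2, hne, Ne.symm h2]
      · by_cases h2 : k = m
        · subst h2
          have hmax : max k k = k := by omega
          rw [if_neg h1, if_pos rfl, ih k (st ++ [i])]
          simp only [hmax]
          by_cases h3 : (rest.map (·.2)).foldl max k = k
          · simp [h3]
          · simp [h3, Ne.symm h3]
        · have hmax : max m k = m := by omega
          rw [if_neg h1, if_neg h2, ih m st]
          simp only [hmax]
          have hMk := hM m
          have hne : ¬ (k = (rest.map (·.2)).foldl max m) := by omega
          simp [hne]

-- A's loop over the second copy of vec (indices ≥ n) never changes max_run or start_indices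
theorem pvSecondHalf (n : Int) (l : List Int) : ∀ (s : Int) (a : Int × Int × Int × List Int),
    n ≤ s →
    ((PySem.List.enumerate l s).foldl (pvStepA n) a).1 = a.1 ∧
    ((PySem.List.enumerate l s).foldl (pvStepA n) a).2.2.2 = a.2.2.2 := by
  induction l with
  | nil => intro s a _; simp [PySem.List.enumerate]
  | cons x xs ih =>
      intro s a hs
      rw [PySem.List.enumerate_cons, List.foldl_cons]
      obtain ⟨h1, h2⟩ := ih (s + 1) (pvStepA n a (s, x)) (by omega)
      have hnlt : ¬ (s < n) := by omega
      constructor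
      · rw [h1]; simp only [pvStepA, hnlt, if_false]
        split_ifs <;> rfl
      · rw [h2]; simp only [pvStepA, hnlt, if_false]
        split_ifs <;> rfl

-- A's loop over a block of 1s at indices < n, after its first element has been consumed
theorem pvRun (n m0 t : Int) (st0 : List Int) (ht0 : 0 ≤ t) (ht1 : t < n) :
    ∀ (k : Nat) (s c : Int), 1 ≤ c → s + (k : Int) ≤ n →
    (PySem.List.enumerate (List.replicate k (1 : Int)) s).foldl (pvStepA n)
      ((if c > m0 then c else m0), c, t,
        (if c > m0 then [t] else if c = m0 then st0 ++ [t] else st0)) =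
    ((if c + k > m0 then c + k else m0), c + k, t,
      (if c + k > m0 then [t] else if c + k = m0 then st0 ++ [t] else st0)) := by
  intro k
  induction k with
  | zero => intro s c hc hsk; simp [PySem.List.enumerate]
  | succ k ih =>
      intro s c hc hsk
      rw [List.replicate_succ, PySem.List.enumerate_cons, List.foldl_cons]
      have hcast : ((k + 1 : Nat) : Int) = (k : Int) + 1 := by push_cast; ring
      have hslt : s < n := by rw [hcast] at hsk; omega
      have hmod : PySem.Int.mod t n = t := by
        rw [PySem.Int.mod_eq_emod_of_pos (by omega)]
        exact Int.emod_eq_of_lt ht0 ht1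
      have hcz : ¬ (c = 0) := by omega
      have hstep : pvStepA n
          ((if c > m0 then c else m0), c, t,
            (if c > m0 then [t] else if c = m0 then st0 ++ [t] else st0)) (s, 1) =
          ((if c + 1 > m0 then c + 1 else m0), c + 1, t,
            (if c + 1 > m0 then [t] else if c + 1 = m0 then st0 ++ [t] else st0)) := by
        simp only [pvStepA, if_pos rfl, hcz, if_false, if_pos hslt, hmod]
        by_cases hA : c > m0
        · have h1 : c + 1 > (if c > m0 then c else m0) := by split_ifs <;> omega
          simp only [if_pos hA, if_pos (by omega : c + 1 > c)]
          simp [show c + 1 > m0 by omega]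
        · simp only [if_neg hA]
          by_cases hB : c + 1 > m0
          · simp [hB, show c = m0 by omega]
          · have hcm : ¬ (c = m0) := by omega
            by_cases hC : c + 1 = m0
            · simp [hB, hC, hcm]
            · simp [hB, hC, hcm]
      rw [hstep]
      have := ih (s + 1) (c + 1) (by omega) (by rw [hcast] at hsk; omega)
      rw [this, hcast]
      have h2 : c + 1 + (k : Int) = c + ((k : Int) + 1) := by ring
      rw [h2]

theorem pvSplitRun_append (l : List Int) :
    List.replicate (pvSplitRun l).1 (1 : Int) ++ (pvSplitRun l).2 = l := by
  induction l with
  | nil => simp [pvSplitRun]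
  | cons x xs ih =>
      by_cases h : x = 1
      · subst h; simp [pvSplitRun, List.replicate_succ, ih]
      · simp [pvSplitRun, h]

theorem pvSplitRun_head (l : List Int) : ∀ y ys, (pvSplitRun l).2 = y :: ys → y ≠ 1 := by
  induction l with
  | nil => intro y ys h; simp [pvSplitRun] at h
  | cons x xs ih =>
      intro y ys h
      by_cases hx : x = 1
      · exact ih y ys (by simpa [pvSplitRun, hx] using h)
      · simp [pvSplitRun, hx] at h
        rcases h with ⟨rfl, rfl⟩; exact hx

theorem pvMaxD_pos (xs : List Int) (hpos : ∀ x ∈ xs, 1 ≤ x) :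
    PySem.List.maxD xs (fun x => x) 0 = xs.foldl max 0 := by
  cases xs with
  | nil => rfl
  | cons x t =>
      have hx : max 0 x = x := by
        have := hpos x (by simp); omega
      simp [PySem.List.maxD, PySem.List.max?_id_cons, List.foldl_cons, hx]

theorem pvSplitRun_len_eq (l : List Int) :
    (pvSplitRun l).1 + (pvSplitRun l).2.length = l.length := by
  conv_rhs => rw [← pvSplitRun_append l]
  simp

theorem pvBlocks_pos : ∀ (N : Nat) (l : List Int), l.length = N →
    ∀ (i : Int), ∀ p ∈ pvBlocks l i, 1 ≤ p.2 := by
  intro N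
  induction N using Nat.strong_induction_on with
  | _ N ih =>
    intro l hN i p hp
    cases l with
    | nil => simp [pvBlocks] at hp
    | cons x xs =>
      by_cases hx : x = 1
      · have hk : 1 ≤ (pvSplitRun (x :: xs)).1 := by simp [pvSplitRun, hx]
        have hlen := pvSplitRun_len_eq (x :: xs)
        simp only [List.length_cons] at hlen hN
        simp only [pvBlocks, if_pos hx, List.mem_cons] at hp
        rcases hp with rfl | hp
        · simp; omega
        · exact ih (pvSplitRun (x :: xs)).2.length (by omega) _ rfl _ p hp
      · simp only [pvBlocks, if_neg hx] at hp
        simp only [List.length_cons] at hN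
        exact ih xs.length (by omega) xs rfl _ p hp

theorem pvFirstHalf (n : Int) : ∀ (N : Nat) (l : List Int), l.length = N →
    ∀ (s m t : Int) (st : List Int), 0 ≤ s → s + l.length ≤ n →
    ((((PySem.List.enumerate l s).foldl (pvStepA n) (m, 0, t, st)).1,
      ((PySem.List.enumerate l s).foldl (pvStepA n) (m, 0, t, st)).2.2.2) : Int × List Int) =
      pvG (pvBlocks l s) (m, st) := by
  intro N
  induction N using Nat.strong_induction_on with
  | _ N ih =>
    intro l hN s m t st h0 hn
    cases l with
    | nil => simp [PySem.List.enumerate, pvBlocks, pvG]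
    | cons x xs =>
      by_cases hx : x = 1
      · -- a maximal 1-block starts here
        obtain ⟨k', hk'⟩ : ∃ k', (pvSplitRun (x :: xs)).1 = k' + 1 :=
          ⟨(pvSplitRun xs).1, by simp [pvSplitRun, hx]⟩
        have hsplit : List.replicate (k' + 1) (1 : Int) ++ (pvSplitRun (x :: xs)).2 = x :: xs := by
          rw [← hk']; exact pvSplitRun_append (x :: xs)
        have hlen : (x :: xs).length = (k' + 1) + (pvSplitRun (x :: xs)).2.length := by
          conv_lhs => rw [← hsplit]
          simp
        simp only [List.length_cons] at hN hn hlen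
        have hslt : s < n := by push_cast at hn; omega
        have hmods : PySem.Int.mod s n = s := by
          rw [PySem.Int.mod_eq_emod_of_pos (by omega)]
          exact Int.emod_eq_of_lt h0 hslt
        have hBl : pvBlocks (x :: xs) s =
            (s, ((k' + 1 : Nat) : Int)) ::
              pvBlocks (pvSplitRun (x :: xs)).2 (s + ((k' + 1 : Nat) : Int)) := by
          simp only [pvBlocks, if_pos hx, hk']
        conv_lhs => rw [← hsplit]
        rw [PySem.List.enumerate_append, List.foldl_append]
        rw [List.replicate_succ, PySem.List.enumerate_cons, List.foldl_cons]
        have hstep0 : pvStepA n (m, 0, t, st) (s, 1) =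
            ((if (1:Int) > m then 1 else m), 1, s,
              (if (1:Int) > m then [s] else if (1:Int) = m then st ++ [s] else st)) := by
          by_cases hA : (1:Int) > m
          · simp [pvStepA, hA, hslt, hmods]
          · by_cases hB : (1:Int) = m <;> simp [pvStepA, hA, hB, hslt, hmods]
        rw [hstep0]
        have hrun := pvRun n m s st h0 hslt k' (s + 1) 1 (by omega)
          (by push_cast at hn hlen ⊢; omega)
        rw [hrun, hBl]
        have hgstep : pvG ((s, ((k' + 1 : Nat) : Int)) ::
              pvBlocks (pvSplitRun (x :: xs)).2 (s + ((k' + 1 : Nat) : Int))) (m, st) =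
            pvG (pvBlocks (pvSplitRun (x :: xs)).2 (s + ((k' + 1 : Nat) : Int)))
              ((if (1 : Int) + k' > m then 1 + k' else m),
               (if (1 : Int) + k' > m then [s] else if (1 : Int) + k' = m then st ++ [s] else st)) := by
          have hc : ((k' + 1 : Nat) : Int) = 1 + (k' : Int) := by push_cast; ring
          simp only [pvG, List.foldl_cons, hc]
          congr 1
          split_ifs <;> rfl
        rw [hgstep]
        cases hr : (pvSplitRun (x :: xs)).2 with
        | nil =>
          simp [PySem.List.enumerate_nil, List.foldl_nil, pvBlocks, pvG]
        | cons y ys =>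
          have hy : y ≠ 1 := pvSplitRun_head (x :: xs) y ys hr
          rw [hr] at hlen
          simp only [List.length_cons] at hlen
          rw [PySem.List.enumerate_cons, List.foldl_cons]
          have hstepy : ∀ (a : Int × Int × Int × List Int) (j : Int),
              pvStepA n a (j, y) = (a.1, 0, a.2.2.1, a.2.2.2) := by
            intro a j; simp [pvStepA, hy]
          rw [hstepy]
          have hblr : pvBlocks (y :: ys) (s + ((k' + 1 : Nat) : Int)) =
              pvBlocks ys (s + ((k' + 1 : Nat) : Int) + 1) := by
            simp only [pvBlocks, if_neg hy]
          rw [hblr]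
          have := ih ys.length (by omega) ys rfl
            (s + ((k' + 1 : Nat) : Int) + 1)
            (if (1 : Int) + k' > m then 1 + k' else m) s
            (if (1 : Int) + k' > m then [s] else if (1 : Int) + k' = m then st ++ [s] else st)
            (by push_cast; omega)
            (by push_cast at hn hlen ⊢; omega)
          simp only [List.length_cons, List.length_replicate]
          exact this
      · rw [PySem.List.enumerate_cons, List.foldl_cons]
        have hstep : pvStepA n (m, 0, t, st) (s, x) = (m, 0, t, st) := by
          simp [pvStepA, hx]
        rw [hstep]
        have hbl : pvBlocks (x :: xs) s = pvBlocks xs (s + 1) := by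
          simp only [pvBlocks, if_neg hx]
        rw [hbl]
        simp only [List.length_cons] at hN hn
        exact ih xs.length (by omega) xs rfl (s + 1) m t st (by omega)
          (by push_cast at hn ⊢; omega)

theorem pvA_eq (vec : List Int) :
    find_longest_circular_runs vec = find_longest_circular_runs_alt vec := by
  simp only [find_longest_circular_runs, find_longest_circular_runs_alt]
  rw [PySem.List.enumerate_append, List.foldl_append]
  obtain ⟨h1, h2⟩ := pvSecondHalf (vec.length : Int) vec (0 + (vec.length : Int))
    ((PySem.List.enumerate vec 0).foldl (pvStepA (vec.length : Int)) (0, 0, 0, []))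
    (by omega)
  rw [h1, h2]
  have hfh := pvFirstHalf (vec.length : Int) vec.length vec rfl 0 0 0 [] (by omega) (by omega)
  have hm := congrArg Prod.fst hfh
  have hs := congrArg Prod.snd hfh
  simp only at hm hs
  rw [hm, hs, pvG_spec]
  have hpos : ∀ z ∈ (pvBlocks vec 0).map (fun p : Int × Int => p.2), 1 ≤ z := by
    intro z hz
    obtain ⟨p, hp, rfl⟩ := List.mem_map.1 hz
    exact pvBlocks_pos vec.length vec rfl 0 p hp
  rw [pvMaxD_pos _ hpos]
  simp

-- ===== VERDICT (by name: the statement is the Claim_ definition above) =====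
theorem find_longest_circular_runs_spec : Claim_equal_find_longest_circular_runs := by
  intro vec _
  unfold Spec_find_longest_circular_runs
  exact pvA_eq vec
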